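-- pv_equiv track=rewrite | github.com/yonasman/DSA-Practice | PrefixSum.py | sum_of_all_subarrays
-- ===== SOURCE A (Python) =====
-- def sum_of_all_subarrays(nums):
--     n = len(nums)
--     totalSum = 0
--
--     for i in range(n):
--         subArraySum = 0
--         for j in range(i,n):
--             subArraySum += nums[j]
--             totalSum += subArraySum
--     return totalSum
-- ===== SOURCE B (Python) =====
-- def sum_of_all_subarrays(nums):
--     n = len(nums)
--     total = 0
--     for i, x in enumerate(nums):
--         total += x * (i + 1) * (n - i)
--     return total
-- ===== Notes on version B (the rewrite author's own statement) =====
-- stated objective: faster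
-- what changed: Replaced the nested loops over all subarray start/end pairs by a single pass summing each element's closed-form contribution nums[i]*(i+1)*(n-i).
import Mathlib
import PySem

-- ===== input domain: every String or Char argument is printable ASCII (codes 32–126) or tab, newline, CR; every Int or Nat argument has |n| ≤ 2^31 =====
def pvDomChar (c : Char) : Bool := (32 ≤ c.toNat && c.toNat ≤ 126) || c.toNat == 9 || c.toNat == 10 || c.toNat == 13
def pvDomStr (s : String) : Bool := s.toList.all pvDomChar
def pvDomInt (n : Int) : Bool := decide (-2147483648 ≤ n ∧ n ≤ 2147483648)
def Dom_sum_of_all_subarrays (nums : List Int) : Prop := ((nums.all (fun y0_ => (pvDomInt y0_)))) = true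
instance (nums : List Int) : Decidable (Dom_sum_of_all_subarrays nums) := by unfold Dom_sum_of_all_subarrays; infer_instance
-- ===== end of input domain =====

-- B replaces A's O(n^2) nested subarray loops by one pass over the closed-form contribution nums[i]*(i+1)*(n-i) (objective: faster).

-- ===== PORT A =====
-- nested loops: for i in range(n): subArraySum = 0; for j in range(i, n): subArraySum += nums[j]; totalSum += subArraySum
def sum_of_all_subarrays (nums : List Int) : Int :=
  let n := PySem.List.len nums
  (PySem.List.pyRange 0 n).foldl
    (fun totalSum i =>
      ((PySem.List.pyRange i n).foldl
        (fun (st : Int × Int) j =>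
          let s := st.1 + PySem.List.pyGetD nums j 0
          (s, st.2 + s))
        (0, totalSum)).2)
    0

-- ===== PORT B =====
def sum_of_all_subarrays_alt (nums : List Int) : Int :=
  let n := PySem.List.len nums
  (PySem.List.enumerate nums).foldl
    (fun total p => total + p.2 * (p.1 + 1) * (n - p.1)) 0

-- ===== PRECONDITION & SPEC =====
def Spec_sum_of_all_subarrays (nums : List Int) (out : Int) : Prop := out = sum_of_all_subarrays_alt nums
instance (nums : List Int) (out : Int) : Decidable (Spec_sum_of_all_subarrays nums out) := by unfold Spec_sum_of_all_subarrays; infer_instance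

-- ===== CLAIM (what is proved, stated in full; the proofs are below) =====
def Claim_equal_sum_of_all_subarrays : Prop := ∀ (nums : List Int), Dom_sum_of_all_subarrays nums → Spec_sum_of_all_subarrays nums (sum_of_all_subarrays nums)

-- ===== LEMMAS AND PROOFS =====

-- G l = Σ_k l[k] * (l.length - k): the total added to totalSum by one run of A's inner loop.
def pvG : List Int → Int
  | [] => 0
  | x :: xs => x * ((xs.length : Int) + 1) + pvG xs

-- H l = Σ over start positions of pvG of the corresponding suffix: A's final total.
def pvH : List Int → Int
  | [] => 0
  | x :: xs => pvG (x :: xs) + pvH xs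

-- A's inner loop, as a fold over the suffix list.
theorem pv_inner_fold (l : List Int) (s0 t0 : Int) :
    l.foldl (fun (st : Int × Int) x =>
        let s := st.1 + x
        (s, st.2 + s)) (s0, t0)
      = (s0 + l.sum, t0 + s0 * (l.length : Int) + pvG l) := by
  induction l generalizing s0 t0 with
  | nil => simp [pvG]
  | cons x xs ih =>
    simp only [List.foldl_cons, ih, pvG, List.sum_cons, List.length_cons]
    refine Prod.ext ?_ ?_ <;> push_cast <;> ring

-- A's outer loop over start indices equals pvH.
theorem pv_range_fold (xs : List Int) (c : Int) :
    (List.range xs.length).foldl (fun t k => t + pvG (xs.drop k)) c = c + pvH xs := by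
  induction xs generalizing c with
  | nil => simp [pvH]
  | cons x xs ih =>
    rw [List.length_cons, List.range_succ_eq_map]
    simp only [List.foldl_cons, List.foldl_map, List.drop_zero, List.drop_succ_cons]
    rw [ih]
    simp [pvH]; ring

theorem pv_A_eq_H (nums : List Int) : sum_of_all_subarrays nums = pvH nums := by
  unfold sum_of_all_subarrays
  simp only [PySem.List.len_eq]
  rw [PySem.List.foldl_congr_mem' (PySem.List.pyRange 0 (nums.length : Int))
      _ (fun t i => t + pvG (nums.drop i.toNat)) 0 ?_]
  · rw [PySem.List.pyRange_one]
    simp only [List.foldl_map, zero_add, Int.toNat_natCast, sub_zero]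
    rw [pv_range_fold nums 0, zero_add]
  · intro i hi acc
    have h0 : 0 ≤ i := (PySem.List.mem_pyRange_one.mp hi).1
    rw [PySem.List.foldl_pyRange_pyGetD' nums 0
        (fun (st : Int × Int) x => let s := st.1 + x; (s, st.2 + s)) (0, acc) h0]
    rw [pv_inner_fold]
    simp

-- B's pass equals pvH: each element at global index p.1 contributes p.2*(p.1+1)*(t - p.1).
theorem pv_key (xs : List Int) : ∀ (s t : Int), t = s + (xs.length : Int) →
    ((PySem.List.enumerate xs s).map (fun p => p.2 * (p.1 + 1) * (t - p.1))).sum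
      = pvH xs + s * pvG xs := by
  induction xs with
  | nil => intro s t ht; simp [pvH, pvG]
  | cons x xs ih =>
    intro s t ht
    rw [PySem.List.enumerate_cons, List.map_cons, List.sum_cons,
        ih (s + 1) t (by rw [ht]; push_cast [List.length_cons]; ring)]
    simp only [pvH, pvG]
    have hn : t - s = (xs.length : Int) + 1 := by rw [ht]; push_cast [List.length_cons]; ring
    rw [show t - s = (xs.length : Int) + 1 from hn]
    ring

theorem pv_B_eq_H (nums : List Int) : sum_of_all_subarrays_alt nums = pvH nums := by
  unfold sum_of_all_subarrays_alt
  simp only [PySem.List.len_eq]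
  rw [PySem.List.foldl_add, pv_key nums 0 (nums.length : Int) (by ring)]
  ring

-- ===== VERDICT (by name: the statement is the Claim_ definition above) =====
theorem sum_of_all_subarrays_spec : Claim_equal_sum_of_all_subarrays := by
  intro nums _
  unfold Spec_sum_of_all_subarrays
  rw [pv_A_eq_H, pv_B_eq_H]
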